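-- pv_equiv track=rewrite | github.com/pbbcache/cachesim | simulator/common/simulator_core.py | generate_dot_tree
-- ===== SOURCE A (Python) =====
-- def repr_node(node):
-- 	out_str = '"['
-- 	for s in node:
-- 		out_str += str(s) + ","
-- 	out_str=out_str.rstrip(",")
-- 	out_str += ']"'
-- 	return out_str
--
-- def generate_dot_tree(nr_ways,nr_partitions,edges,padre):
-- 	assert nr_partitions<=nr_ways
--
-- 	if nr_partitions==1:
-- 		node=list(padre)
-- 		node.append(nr_ways)
-- 		edges.append(repr_node(padre)+' -> '+repr_node(node))
-- 		return 1
-- 	elif nr_ways==nr_partitions: ## Just one app can take the extra way...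
-- 		node=list(padre)
-- 		for i in range(nr_partitions):
-- 			node.append(1)
-- 		edges.append(repr_node(padre)+' -> '+repr_node(node))
-- 		return nr_partitions
-- 	else:
-- 		## Recursive case
-- 		total_solutions = 0
-- 		for i in range(1,nr_ways-(nr_partitions-1)+1):
-- 			node=list(padre)
-- 			node.append(i)
-- 			if padre:
-- 				edges.append(repr_node(padre)+' -> '+repr_node(node))
-- 			else:
-- 				edges.append('"[]"'+' -> '+repr_node(node))
--
-- 			total_solutions+=generate_dot_tree(nr_ways-i,nr_partitions-1,edges,node)
--
-- 		return total_solutions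
-- ===== SOURCE B (Python) =====
-- # Iterative re-implementation: explicit LIFO worklist of (ways, parts, node, incoming-edge)
-- # frames instead of recursion; children are pushed in reverse so edges come out in A's
-- # pre-order, and the per-leaf contributions (+1 / +parts) accumulate into one total.
-- # Mutates `edges` in place exactly like the original.
--
-- def repr_node(node):
--     return '"[' + ",".join(str(s) for s in node) + ']"'
--
-- def generate_dot_tree(nr_ways, nr_partitions, edges, padre):
--     assert nr_partitions <= nr_ways
--
--     total = 0
--     stack = [(nr_ways, nr_partitions, list(padre), None)]
--     while stack:
--         ways, parts, node, edge = stack.pop()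
--         if edge is not None:
--             edges.append(edge)
--         if parts == 1:
--             child = node + [ways]
--             edges.append(repr_node(node) + ' -> ' + repr_node(child))
--             total += 1
--         elif ways == parts:
--             child = node + [1] * parts
--             edges.append(repr_node(node) + ' -> ' + repr_node(child))
--             total += parts
--         else:
--             children = []
--             for i in range(1, ways - parts + 2):
--                 child = node + [i]
--                 children.append((ways - i, parts - 1, child,
--                                  repr_node(node) + ' -> ' + repr_node(child)))
--             stack.extend(reversed(children))
--     return total
-- ===== Notes on version B (the rewrite author's own statement) =====
-- stated objective: alternative
-- what changed: Replaces A's recursion with an explicit LIFO worklist of (ways, parts, node, incoming-edge) frames, pushing children in reverse so the edges come out in A's pre-order while a single running total accumulates the per-leaf contributions (+1 / +parts); the helper builds node strings with ','.join instead of append-then-rstrip.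
import Mathlib
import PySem

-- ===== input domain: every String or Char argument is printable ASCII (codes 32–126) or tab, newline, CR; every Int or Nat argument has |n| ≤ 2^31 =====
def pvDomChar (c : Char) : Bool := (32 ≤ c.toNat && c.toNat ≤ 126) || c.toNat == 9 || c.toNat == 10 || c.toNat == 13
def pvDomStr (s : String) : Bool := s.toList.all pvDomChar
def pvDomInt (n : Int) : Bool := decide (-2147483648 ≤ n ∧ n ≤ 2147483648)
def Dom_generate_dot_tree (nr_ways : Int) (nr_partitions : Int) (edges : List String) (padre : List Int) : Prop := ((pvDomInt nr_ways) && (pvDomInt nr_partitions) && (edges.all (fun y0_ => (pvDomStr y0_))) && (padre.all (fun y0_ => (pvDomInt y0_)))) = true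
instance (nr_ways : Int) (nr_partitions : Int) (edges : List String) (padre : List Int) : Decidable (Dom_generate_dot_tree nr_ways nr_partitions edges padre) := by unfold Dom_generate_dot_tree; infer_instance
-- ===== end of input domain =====

-- B replaces A's recursion by an explicit LIFO worklist of (ways, parts, node, incoming-edge)
-- frames (objective: alternative decomposition, same cost). Both programs also append the same
-- edge strings to `edges` in place; the equivalence proved here is about the RETURN value (the
-- solution count) only.

-- ===== PORT A =====
-- hand port of Python's str.rstrip(",") (drop trailing ',' characters) — exact
def pvRstripComma (s : String) : String :=
  String.ofList ((s.toList.reverse.dropWhile (fun c => c = ',')).reverse)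

-- port of A's helper repr_node
def repr_node_A (node : List Int) : String :=
  pvRstripComma (node.foldl (fun acc x => acc ++ PySem.Int.toStr x ++ ",") "\"[") ++ "]\""

-- A's recursive body; the Nat argument is a fuel/totality guard only (Python's recursion
-- depth is nr_partitions on every admitted input, so fuel nr_partitions.toNat + 1 is never
-- exhausted inside Pre_); it returns (edges after the in-place appends, total_solutions).
def gdtA : Nat → Int → Int → List String → List Int → List String × Int
  | 0, _, _, edges, _ => (edges, 0)
  | f + 1, nr_ways, nr_partitions, edges, padre =>
    if nr_partitions = 1 then
      let node := padre ++ [nr_ways]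
      (edges ++ [repr_node_A padre ++ " -> " ++ repr_node_A node], 1)
    else if nr_ways = nr_partitions then
      let node := padre ++ List.replicate nr_partitions.toNat 1
      (edges ++ [repr_node_A padre ++ " -> " ++ repr_node_A node], nr_partitions)
    else
      (PySem.List.pyRange 1 (nr_ways - (nr_partitions - 1) + 1) 1).foldl
        (fun st i =>
          let node := padre ++ [i]
          let st1 := st.1 ++
            [(if padre ≠ [] then repr_node_A padre else "\"[]\"") ++ " -> " ++ repr_node_A node]
          let r := gdtA f (nr_ways - i) (nr_partitions - 1) st1 node
          (r.1, st.2 + r.2))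
        (edges, 0)

def generate_dot_tree (nr_ways : Int) (nr_partitions : Int) (edges : List String) (padre : List Int) : Int :=
  (gdtA (nr_partitions.toNat + 1) nr_ways nr_partitions edges padre).2

-- ===== PORT B =====
-- port of B's helper repr_node (join-based)
def repr_node_B (node : List Int) : String :=
  "\"[" ++ PySem.Str.join "," (node.map PySem.Int.toStr) ++ "]\""

-- B's while-loop over the explicit stack. The Lean list holds the stack TOP FIRST, so
-- Python's stack.extend(reversed(children)) (next pop = i = 1) is `children ++ stack` here.
-- The Nat argument is a fuel/totality guard only (one unit per pop; the chosen fuel is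
-- never exhausted inside Pre_). Returns (edges, total).
def loopB : Nat → List (Int × Int × List Int × Option String) → List String → Int → List String × Int
  | 0, _, edges, total => (edges, total)
  | _ + 1, [], edges, total => (edges, total)
  | f + 1, (ways, parts, node, edge) :: stack, edges, total =>
    let edges := match edge with | none => edges | some e => edges ++ [e]
    if parts = 1 then
      let child := node ++ [ways]
      loopB f stack (edges ++ [repr_node_B node ++ " -> " ++ repr_node_B child]) (total + 1)
    else if ways = parts then
      let child := node ++ List.replicate parts.toNat 1
      loopB f stack (edges ++ [repr_node_B node ++ " -> " ++ repr_node_B child]) (total + parts)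
    else
      let children := (PySem.List.pyRange 1 (ways - parts + 2) 1).map
        (fun i => (ways - i, parts - 1, node ++ [i],
          some (repr_node_B node ++ " -> " ++ repr_node_B (node ++ [i]))))
      loopB f (children ++ stack) edges total

def generate_dot_tree_alt (nr_ways : Int) (nr_partitions : Int) (edges : List String) (padre : List Int) : Int :=
  (loopB ((nr_ways.toNat + 2) ^ (nr_partitions.toNat + 1))
    [(nr_ways, nr_partitions, padre, none)] edges 0).2

-- ===== PRECONDITION & SPEC =====
-- Pre_ is exactly where Python A returns normally: nr_partitions > nr_ways fails A's assert
-- (AssertionError), and nr_partitions ≤ 0 with nr_ways ≠ nr_partitions recurses forever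
-- (RecursionError).
def Pre_generate_dot_tree (nr_ways : Int) (nr_partitions : Int) (edges : List String) (padre : List Int) : Prop :=
  nr_partitions ≤ nr_ways ∧ (1 ≤ nr_partitions ∨ nr_ways = nr_partitions)
instance (nr_ways : Int) (nr_partitions : Int) (edges : List String) (padre : List Int) : Decidable (Pre_generate_dot_tree nr_ways nr_partitions edges padre) := by unfold Pre_generate_dot_tree; infer_instance

def pvWitness_generate_dot_tree : Int × Int × List String × List Int := (4, 2, [], [])

def Spec_generate_dot_tree (nr_ways : Int) (nr_partitions : Int) (edges : List String) (padre : List Int) (out : Int) : Prop := out = generate_dot_tree_alt nr_ways nr_partitions edges padre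
instance (nr_ways : Int) (nr_partitions : Int) (edges : List String) (padre : List Int) (out : Int) : Decidable (Spec_generate_dot_tree nr_ways nr_partitions edges padre out) := by unfold Spec_generate_dot_tree; infer_instance

-- ===== CLAIM (what is proved, stated in full; the proofs are below) =====
def Claim_equal_generate_dot_tree : Prop := ∀ (nr_ways : Int) (nr_partitions : Int) (edges : List String) (padre : List Int), Dom_generate_dot_tree nr_ways nr_partitions edges padre → Pre_generate_dot_tree nr_ways nr_partitions edges padre → Spec_generate_dot_tree nr_ways nr_partitions edges padre (generate_dot_tree nr_ways nr_partitions edges padre)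

-- ===== LEMMAS AND PROOFS =====

-- the pure solution count computed by A's recursion (edges stripped away)
def gC : Nat → Int → Int → Int
  | 0, _, _ => 0
  | f + 1, n, p =>
    if p = 1 then 1
    else if n = p then p
    else (PySem.List.pyRange 1 (n - (p - 1) + 1) 1).foldl
      (fun t i => t + gC f (n - i) (p - 1)) 0

-- A's worker returns gC in its second component, whatever the edge state
theorem gdtA_snd : ∀ (f : Nat) (n p : Int) (e : List String) (pad : List Int),
    (gdtA f n p e pad).2 = gC f n p := by
  intro f
  induction f with
  | zero => intro n p e pad; rfl
  | succ f ih =>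
    intro n p e pad
    have aux : ∀ (gs : List String × Int → Int → List String) (L : List Int)
        (st : List String × Int),
        ((L.foldl (fun st i =>
            let st1 := gs st i
            let r := gdtA f (n - i) (p - 1) st1 (pad ++ [i])
            (r.1, st.2 + r.2)) st).2)
          = L.foldl (fun t i => t + gC f (n - i) (p - 1)) st.2 := by
      intro gs L
      induction L with
      | nil => intro st; rfl
      | cons i L ihL =>
        intro st
        simp only [List.foldl_cons]
        rw [ihL]
        simp only [ih]
    show (gdtA (f + 1) n p e pad).2 = gC (f + 1) n p
    rw [gdtA, gC]
    by_cases h1 : p = 1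
    · rw [if_pos h1, if_pos h1]
    · rw [if_neg h1, if_neg h1]
      by_cases h2 : n = p
      · rw [if_pos h2, if_pos h2]
      · rw [if_neg h2, if_neg h2]
        exact aux (fun st i => st.1 ++
          [(if pad ≠ [] then repr_node_A pad else "\"[]\"") ++ " -> " ++ repr_node_A (pad ++ [i])])
          (PySem.List.pyRange 1 (n - (p - 1) + 1) 1) (e, 0)

-- the canonical count of an (n, p) subtree
def Fc (n p : Int) : Int := gC (p.toNat + 1) n p

theorem Fc_one (n : Int) : Fc n 1 = 1 := by simp [Fc, gC]

theorem Fc_diag (p : Int) (h : p ≠ 1) : Fc p p = p := by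
  rw [Fc, gC, if_neg h, if_pos rfl]

-- loopB returns immediately on an empty stack, with any fuel
theorem loopB_nil : ∀ (f : Nat) (e : List String) (a : Int), loopB f [] e a = (e, a) := by
  intro f e a; cases f <;> rfl

-- one pop of a parts = 1 leaf frame
theorem loopB_leaf1 : ∀ (n : Int) (node : List Int) (eo : Option String),
    ∃ E : List String, ∀ (fuel : Nat) rest (edges : List String) (acc : Int),
      loopB (1 + fuel) ((n, 1, node, eo) :: rest) edges acc
        = loopB fuel rest (edges ++ E) (acc + 1) := by
  intro n node eo
  refine ⟨eo.toList ++ [repr_node_B node ++ " -> " ++ repr_node_B (node ++ [n])], ?_⟩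
  intro fuel rest edges acc
  rw [Nat.add_comm 1 fuel]
  cases eo <;> simp [loopB]

-- one pop of a ways = parts leaf frame (parts ≠ 1)
theorem loopB_leaf2 : ∀ (p : Int), p ≠ 1 → ∀ (node : List Int) (eo : Option String),
    ∃ E : List String, ∀ (fuel : Nat) rest (edges : List String) (acc : Int),
      loopB (1 + fuel) ((p, p, node, eo) :: rest) edges acc
        = loopB fuel rest (edges ++ E) (acc + p) := by
  intro p h1 node eo
  refine ⟨eo.toList ++ [repr_node_B node ++ " -> " ++
    repr_node_B (node ++ List.replicate p.toNat 1)], ?_⟩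
  intro fuel rest edges acc
  rw [Nat.add_comm 1 fuel]
  cases eo <;> simp [loopB, h1]

-- shape of one B frame's subtree: it consumes a bounded number m of pops, appends a block E
-- of edge strings, adds Fc n p to the running total, and leaves the rest of the stack intact.
theorem loopB_step : ∀ (k : Nat) (n p : Int), p.toNat ≤ k →
    p ≤ n → (1 ≤ p ∨ n = p) →
    ∀ (node : List Int) (eo : Option String),
    ∃ (m : Nat) (E : List String),
      0 < m ∧ m ≤ (n.toNat + 2) ^ p.toNat ∧
      ∀ (fuel : Nat) (rest : List (Int × Int × List Int × Option String))
        (edges : List String) (acc : Int),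
        loopB (m + fuel) ((n, p, node, eo) :: rest) edges acc
          = loopB fuel rest (edges ++ E) (acc + Fc n p) := by
  intro k
  induction k with
  | zero =>
    intro n p hk hpn hpre node eo
    have hp0 : p ≤ 0 := by omega
    have h1 : p ≠ 1 := by omega
    have hnp : n = p := by rcases hpre with h | h <;> omega
    subst hnp
    obtain ⟨E, hE⟩ := loopB_leaf2 n h1 node eo
    exact ⟨1, E, Nat.one_pos, Nat.one_le_pow _ _ (by omega), fun fuel rest edges acc => by
      rw [hE, Fc_diag n h1]⟩
  | succ k ih =>
    intro n p hk hpn hpre node eo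
    by_cases h1 : p = 1
    · subst h1
      obtain ⟨E, hE⟩ := loopB_leaf1 n node eo
      exact ⟨1, E, Nat.one_pos, Nat.one_le_pow _ _ (by omega), fun fuel rest edges acc => by
        rw [hE, Fc_one]⟩
    · by_cases h2 : n = p
      · subst h2
        obtain ⟨E, hE⟩ := loopB_leaf2 n h1 node eo
        exact ⟨1, E, Nat.one_pos, Nat.one_le_pow _ _ (by omega), fun fuel rest edges acc => by
          rw [hE, Fc_diag n h1]⟩
      · -- recursive case: 2 ≤ p < n
        have hp2 : 2 ≤ p := by rcases hpre with h | h <;> omega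
        have hpn' : p < n := lt_of_le_of_ne hpn (fun h => h2 h.symm)
        -- processing a list of child frames
        have frames : ∀ (L : List Int), (∀ i ∈ L, 1 ≤ i ∧ i ≤ n - p + 1) →
            ∃ (m : Nat) (E : List String),
              m ≤ L.length * (n.toNat + 1) ^ (p - 1).toNat ∧
              ∀ (fuel : Nat) rest (edges : List String) (acc : Int),
                loopB (m + fuel)
                  ((L.map (fun i => (n - i, p - 1, node ++ [i],
                    some (repr_node_B node ++ " -> " ++ repr_node_B (node ++ [i]))))) ++ rest)
                  edges acc
                = loopB fuel rest (edges ++ E)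
                    (acc + (L.map (fun i => Fc (n - i) (p - 1))).sum) := by
          intro L
          induction L with
          | nil =>
            intro _
            exact ⟨0, [], by simp, fun fuel rest edges acc => by simp⟩
          | cons i L ihL =>
            intro hb
            have hi := hb i List.mem_cons_self
            obtain ⟨m1, E1, _, hm1, hrun1⟩ :=
              ih (n - i) (p - 1) (by omega) (by omega) (Or.inl (by omega)) (node ++ [i])
                (some (repr_node_B node ++ " -> " ++ repr_node_B (node ++ [i])))
            obtain ⟨m2, E2, hm2, hrun2⟩ := ihL (fun j hj => hb j (List.mem_cons_of_mem _ hj))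
            refine ⟨m1 + m2, E1 ++ E2, ?_, ?_⟩
            · have hbase : (n - i).toNat + 2 ≤ n.toNat + 1 := by omega
              have := Nat.pow_le_pow_left hbase (p - 1).toNat
              calc m1 + m2 ≤ (n.toNat + 1) ^ (p - 1).toNat
                    + L.length * (n.toNat + 1) ^ (p - 1).toNat :=
                    Nat.add_le_add (le_trans hm1 this) hm2
                _ = (i :: L).length * (n.toNat + 1) ^ (p - 1).toNat := by
                    simp [List.length_cons, Nat.succ_mul, Nat.add_comm]
            · intro fuel rest edges acc
              have hsplit : m1 + m2 + fuel = m1 + (m2 + fuel) := by omega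
              rw [hsplit]
              simp only [List.map_cons, List.cons_append]
              rw [hrun1, hrun2]
              simp [List.append_assoc, add_assoc]
        have hbnd : ∀ i ∈ PySem.List.pyRange 1 (n - p + 2) 1, 1 ≤ i ∧ i ≤ n - p + 1 := by
          intro i hi
          have := PySem.List.mem_pyRange_one.mp hi
          omega
        obtain ⟨mL, EL, hmL, hrun⟩ := frames (PySem.List.pyRange 1 (n - p + 2) 1) hbnd
        have hF : Fc n p
            = ((PySem.List.pyRange 1 (n - p + 2) 1).map (fun i => Fc (n - i) (p - 1))).sum := by
          rw [Fc, gC, if_neg h1, if_neg h2]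
          have hr : n - (p - 1) + 1 = n - p + 2 := by ring
          have hp : p.toNat = (p - 1).toNat + 1 := by omega
          rw [hr, hp, PySem.List.foldl_add]
          simp [Fc]
        refine ⟨mL + 1, eo.toList ++ EL, by omega, ?_, ?_⟩
        · -- fuel bound: 1 + |children| · (n+1)^(p-1) ≤ (n+2)^p
          have hlen : (PySem.List.pyRange 1 (n - p + 2) 1).length = (n - p + 2 - 1).toNat :=
            PySem.List.length_pyRange_one 1 (n - p + 2)
          have hlen' : (n - p + 2 - 1).toNat ≤ n.toNat - 1 := by omega
          have hX : 1 ≤ (n.toNat + 2) ^ (p - 1).toNat := Nat.one_le_pow _ _ (by omega)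
          have hpe : p.toNat = (p - 1).toNat + 1 := by omega
          rw [hpe]
          have hmL' : mL ≤ (n.toNat - 1) * (n.toNat + 1) ^ (p - 1).toNat := by
            rw [hlen] at hmL
            exact le_trans hmL (Nat.mul_le_mul_right _ hlen')
          calc mL + 1
              ≤ (n.toNat - 1) * (n.toNat + 1) ^ (p - 1).toNat + 1 := by omega
            _ ≤ (n.toNat - 1) * (n.toNat + 2) ^ (p - 1).toNat
                + 3 * (n.toNat + 2) ^ (p - 1).toNat := by
                have hpow := Nat.pow_le_pow_left (by omega : n.toNat + 1 ≤ n.toNat + 2) (p - 1).toNat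
                have := Nat.mul_le_mul (le_refl (n.toNat - 1)) hpow
                omega
            _ = (n.toNat + 2) ^ ((p - 1).toNat + 1) := by
                rw [← Nat.add_mul, pow_succ]
                have hn3 : 3 ≤ n.toNat := by omega
                rw [Nat.mul_comm ((n.toNat + 2) ^ (p - 1).toNat) (n.toNat + 2)]
                congr 1
                omega
        · intro fuel rest edges acc
          have hsplit : mL + 1 + fuel = (mL + fuel) + 1 := by omega
          rw [hsplit]
          cases eo <;>
            · simp only [loopB, Option.toList]
              rw [if_neg h1, if_neg h2, hrun fuel rest _ acc]
              simp [List.append_assoc, hF]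

theorem generate_dot_tree_spec : Claim_equal_generate_dot_tree := by
  intro n p edges padre _ hpre
  show generate_dot_tree n p edges padre = generate_dot_tree_alt n p edges padre
  rw [generate_dot_tree, generate_dot_tree_alt, gdtA_snd]
  obtain ⟨m, E, _, hmle, hrun⟩ :=
    loopB_step p.toNat n p le_rfl hpre.1 hpre.2 padre none
  have hfuel : m ≤ (n.toNat + 2) ^ (p.toNat + 1) :=
    le_trans hmle (Nat.pow_le_pow_right (by omega) (Nat.le_succ _))
  have hsplit : (n.toNat + 2) ^ (p.toNat + 1) = m + ((n.toNat + 2) ^ (p.toNat + 1) - m) := by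
    omega
  rw [hsplit, hrun, loopB_nil]
  simp [Fc]
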